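-- pv_equiv track=rewrite | github.com/Zayaan3019/IR_System | Main_project_code/spell_check.py | spell_check
-- ===== SOURCE A (Python) =====
-- def damerau_levenshtein(s1, s2):
--     m = len(s1)
--     n = len(s2)
--     d = [[0]*(n+1) for _ in range(m+1)]
--
--     for i in range(m+1):
--         d[i][0] = i
--     for j in range(n+1):
--         d[0][j] = j
--
--     for i in range(1, m+1):
--         for j in range(1, n+1):
--             cost = 0 if s1[i-1] == s2[j-1] else 1
--             d[i][j] = min(
--                 d[i-1][j] + 1,      # Deletion
--                 d[i][j-1] + 1,      # Insertion
--                 d[i-1][j-1] + cost   # Substitution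
--             )
--             # Transposition check (Damerau extension)
--             if i > 1 and j > 1 and s1[i-1] == s2[j-2] and s1[i-2] == s2[j-1]:
--                 d[i][j] = min(d[i][j], d[i-2][j-2] + 1)
--     return d[-1][-1]
--
-- def spell_check(word, dictionary, max_distance=2):
--     suggestions = []
--     for correct_word in dictionary:
--         if abs(len(correct_word) - len(word)) > max_distance:
--             continue                                                        # Skipping obviously mismatched lengths
--         distance = damerau_levenshtein(word.lower(), correct_word.lower())
--         if distance <= max_distance:
--             suggestions.append((correct_word, distance))
--     return sorted(suggestions, key=lambda x: (x[1], -len(x[0])))[:5]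
-- ===== SOURCE B (Python) =====
-- def _osa_memo(s1, s2):
--     # top-down memoized OSA distance of prefixes: edit(i, j) = distance of s1[:i], s2[:j]
--     memo = {}
--
--     def edit(i, j):
--         if j == 0:
--             return i
--         if i == 0:
--             return j
--         key = (i, j)
--         if key in memo:
--             return memo[key]
--         cost = 0 if s1[i - 1] == s2[j - 1] else 1
--         v = min(edit(i - 1, j) + 1, edit(i, j - 1) + 1, edit(i - 1, j - 1) + cost)
--         if i > 1 and j > 1 and s1[i - 1] == s2[j - 2] and s1[i - 2] == s2[j - 1]:
--             v = min(v, edit(i - 2, j - 2) + 1)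
--         memo[key] = v
--         return v
--
--     return edit(len(s1), len(s2))
--
--
-- def spell_check(word, dictionary, max_distance=2):
--     w = word.lower()
--     scored = [(cw, _osa_memo(w, cw.lower())) for cw in dictionary
--               if abs(len(cw) - len(word)) <= max_distance]
--     suggestions = [p for p in scored if p[1] <= max_distance]
--     return sorted(suggestions, key=lambda x: (x[1], -len(x[0])))[:5]
-- ===== Notes on version B (the rewrite author's own statement) =====
-- stated objective: alternative
-- what changed: B computes the OSA distance by a top-down memoized recursive helper edit(i, j) over prefix lengths with a dict cache instead of A's bottom-up (m+1)x(n+1) table with two init loops and nested index loops, and spell_check itself is restaged as comprehension pipelines (length-pruned scoring comprehension, then a threshold filter) instead of A's single accumulator loop.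
import Mathlib
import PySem

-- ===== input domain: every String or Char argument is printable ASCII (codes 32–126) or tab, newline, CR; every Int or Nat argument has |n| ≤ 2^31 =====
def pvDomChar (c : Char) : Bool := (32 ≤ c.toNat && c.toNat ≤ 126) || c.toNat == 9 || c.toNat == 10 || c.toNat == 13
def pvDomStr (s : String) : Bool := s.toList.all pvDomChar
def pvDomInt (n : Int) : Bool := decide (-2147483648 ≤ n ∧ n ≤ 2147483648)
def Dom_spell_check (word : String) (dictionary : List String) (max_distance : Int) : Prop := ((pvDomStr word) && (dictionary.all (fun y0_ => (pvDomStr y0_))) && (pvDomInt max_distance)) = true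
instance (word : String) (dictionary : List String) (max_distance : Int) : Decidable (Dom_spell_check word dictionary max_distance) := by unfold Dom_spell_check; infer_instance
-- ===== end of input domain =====

-- B replaces A's bottom-up (m+1)×(n+1) distance table by a top-down memoized
-- recursion edit(i, j) over prefix lengths with a dict cache, and restages the
-- scoring loop as comprehension pipelines; objective: alternative.

-- ===== PORT A =====
-- Python's damerau_levenshtein on strings; indexing s1[i-1] is code-point indexing,
-- done here through toList (exact for Python str over any characters). The three
-- loops of the Python body are the three named step functions below.
def dlInit1Step (d : List (List Int)) (i : Int) : List (List Int) :=
  PySem.List.pySetD d i (PySem.List.pySetD (PySem.List.pyGetD d i []) 0 i)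

def dlInit2Step (d : List (List Int)) (j : Int) : List (List Int) :=
  PySem.List.pySetD d 0 (PySem.List.pySetD (PySem.List.pyGetD d 0 []) j j)

def dlInnerStep (c1 c2 : List Char) (i : Int) (d : List (List Int)) (j : Int) : List (List Int) :=
  let cost : Int := if PySem.List.pyGetD c1 (i - 1) ' ' = PySem.List.pyGetD c2 (j - 1) ' ' then 0 else 1
  let dij := min (min (PySem.List.pyGetD (PySem.List.pyGetD d (i - 1) []) j 0 + 1)
                      (PySem.List.pyGetD (PySem.List.pyGetD d i []) (j - 1) 0 + 1))
                 (PySem.List.pyGetD (PySem.List.pyGetD d (i - 1) []) (j - 1) 0 + cost)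
  let d := PySem.List.pySetD d i (PySem.List.pySetD (PySem.List.pyGetD d i []) j dij)
  if i > 1 ∧ j > 1 ∧ PySem.List.pyGetD c1 (i - 1) ' ' = PySem.List.pyGetD c2 (j - 2) ' '
       ∧ PySem.List.pyGetD c1 (i - 2) ' ' = PySem.List.pyGetD c2 (j - 1) ' ' then
    PySem.List.pySetD d i (PySem.List.pySetD (PySem.List.pyGetD d i []) j
      (min (PySem.List.pyGetD (PySem.List.pyGetD d i []) j 0)
           (PySem.List.pyGetD (PySem.List.pyGetD d (i - 2) []) (j - 2) 0 + 1)))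
  else d

def dlOuterStep (c1 c2 : List Char) (n : Nat) (d : List (List Int)) (i : Int) : List (List Int) :=
  (PySem.List.pyRange 1 ((n : Int) + 1) 1).foldl (dlInnerStep c1 c2 i) d

def damerau_levenshtein (s1 s2 : String) : Int :=
  let c1 := s1.toList
  let c2 := s2.toList
  let m := c1.length
  let n := c2.length
  let d : List (List Int) := (PySem.List.pyRange 0 ((m : Int) + 1) 1).map (fun _ => List.replicate (n + 1) (0 : Int))
  let d := (PySem.List.pyRange 0 ((m : Int) + 1) 1).foldl dlInit1Step d
  let d := (PySem.List.pyRange 0 ((n : Int) + 1) 1).foldl dlInit2Step d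
  let d := (PySem.List.pyRange 1 ((m : Int) + 1) 1).foldl (dlOuterStep c1 c2 n) d
  PySem.List.pyGetD (PySem.List.pyGetD d (-1) []) (-1) 0

def spell_check (word : String) (dictionary : List String) (max_distance : Int) : List (String × Int) :=
  let suggestions := dictionary.foldl (fun suggestions correct_word =>
    if |PySem.Str.len correct_word - PySem.Str.len word| > max_distance then suggestions
    else
      let distance := damerau_levenshtein (PySem.Str.lower word) (PySem.Str.lower correct_word)
      if distance ≤ max_distance then suggestions ++ [(correct_word, distance)] else suggestions)
    ([] : List (String × Int))
  PySem.List.slice (PySem.List.sorted2 suggestions (fun x => x.2) (fun x => -(PySem.Str.len x.1))) none (some 5)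

-- ===== PORT B =====
-- Source B's edit(i, j): top-down memoized recursion on the two prefix lengths, the
-- memo dict threaded through in Python's evaluation order (the three plain
-- recursive calls left to right, then the transposition call inside its guard,
-- then the memo store). Indices i-1, j-1, j-2 … are in range at every call site
-- (edit is only reached with i ≤ |s1|, j ≤ |s2|), so getD is exact there.
def editStep (s1 s2 : List Char) : Nat → Nat → PySem.Dict (Int × Int) Int → Int × PySem.Dict (Int × Int) Int
  | i, 0, memo => ((i : Int), memo)
  | 0, j + 1, memo => ((j : Int) + 1, memo)
  | i + 1, j + 1, memo =>
    match memo.get? (((i : Int) + 1), ((j : Int) + 1)) with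
    | some v => (v, memo)
    | none =>
      let r1 := editStep s1 s2 i (j + 1) memo
      let r2 := editStep s1 s2 (i + 1) j r1.2
      let r3 := editStep s1 s2 i j r2.2
      let cost : Int := if s1.getD i ' ' = s2.getD j ' ' then 0 else 1
      let v := min (min (r1.1 + 1) (r2.1 + 1)) (r3.1 + cost)
      let r4 : Int × PySem.Dict (Int × Int) Int :=
        if 1 ≤ i ∧ 1 ≤ j ∧ s1.getD i ' ' = s2.getD (j - 1) ' ' ∧ s1.getD (i - 1) ' ' = s2.getD j ' '
        then
          let t := editStep s1 s2 (i - 1) (j - 1) r3.2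
          (min v (t.1 + 1), t.2)
        else (v, r3.2)
      (r4.1, r4.2.insert (((i : Int) + 1), ((j : Int) + 1)) r4.1)
termination_by i j _ => i + j
decreasing_by all_goals omega

-- Source B's _osa_memo: fresh memo, then edit(len(s1), len(s2))
def osaMemo (s1 s2 : List Char) : Int :=
  (editStep s1 s2 s1.length s2.length PySem.Dict.empty).1

def spell_check_alt (word : String) (dictionary : List String) (max_distance : Int) : List (String × Int) :=
  let w := PySem.Str.lower word
  let scored := (dictionary.filter
      (fun cw => |PySem.Str.len cw - PySem.Str.len word| ≤ max_distance)).map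
    (fun cw => (cw, osaMemo w.toList (PySem.Str.lower cw).toList))
  let suggestions := scored.filter (fun p => p.2 ≤ max_distance)
  PySem.List.slice (PySem.List.sorted2 suggestions (fun x => x.2) (fun x => -(PySem.Str.len x.1))) none (some 5)

-- ===== PRECONDITION & SPEC =====
def Spec_spell_check (word : String) (dictionary : List String) (max_distance : Int) (out : List (String × Int)) : Prop := out = spell_check_alt word dictionary max_distance
instance (word : String) (dictionary : List String) (max_distance : Int) (out : List (String × Int)) : Decidable (Spec_spell_check word dictionary max_distance out) := by unfold Spec_spell_check; infer_instance

-- ===== CLAIM (what is proved, stated in full; the proofs are below) =====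
def Claim_equal_spell_check : Prop := ∀ (word : String) (dictionary : List String) (max_distance : Int), Dom_spell_check word dictionary max_distance → Spec_spell_check word dictionary max_distance (spell_check word dictionary max_distance)

-- ===== LEMMAS AND PROOFS =====

-- The OSA prefix-distance recurrence both programs compute: osa s1 s2 i j is the
-- value d[i][j] of A's table and the value of B's edit(i, j).
def osa (s1 s2 : List Char) : Nat → Nat → Int
  | 0, j => j
  | i + 1, 0 => (i : Int) + 1
  | i + 1, j + 1 =>
    let cost : Int := if s1.getD i ' ' = s2.getD j ' ' then 0 else 1
    let v := min (min (osa s1 s2 i (j + 1) + 1) (osa s1 s2 (i + 1) j + 1)) (osa s1 s2 i j + cost)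
    if 1 ≤ i ∧ 1 ≤ j ∧ s1.getD i ' ' = s2.getD (j - 1) ' ' ∧ s1.getD (i - 1) ' ' = s2.getD j ' '
    then min v (osa s1 s2 (i - 1) (j - 1) + 1) else v
termination_by i j => i + j
decreasing_by all_goals omega

-- row i of the finished table
def rowS (s1 s2 : List Char) (r : Nat) : List Int :=
  (List.range (s2.length + 1)).map (fun j => osa s1 s2 r j)

-- last entry of a row represented as a map over List.range
theorem lastEntry {α : Type} (n : Nat) (f : Nat → α) (d : α) :
    PySem.List.pyGetD ((List.range (n+1)).map f) (-1) d = f n := by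
  rw [PySem.List.pyGetD_neg_one ((List.range (n+1)).map f) d (by simp)]
  simp [List.getLast_eq_getElem]

-- ---- B-side: the memo invariant ----

-- every stored value is the OSA value of its key
def MemoOK (s1 s2 : List Char) (memo : PySem.Dict (Int × Int) Int) : Prop :=
  ∀ (a b : Nat) (v : Int), memo.get? (((a : Nat) : Int), ((b : Nat) : Int)) = some v → v = osa s1 s2 a b

theorem edit_ok (s1 s2 : List Char) : ∀ (N i j : Nat) (memo : PySem.Dict (Int × Int) Int),
    i + j ≤ N → MemoOK s1 s2 memo →
    (editStep s1 s2 i j memo).1 = osa s1 s2 i j ∧ MemoOK s1 s2 (editStep s1 s2 i j memo).2 := by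
  intro N
  induction N with
  | zero =>
    intro i j memo hle hok
    have hi : i = 0 := by omega
    have hj : j = 0 := by omega
    subst hi; subst hj
    exact ⟨by simp [editStep, osa], by simpa [editStep] using hok⟩
  | succ N ih =>
    intro i j memo hle hok
    match i, j with
    | i, 0 =>
      refine ⟨?_, by simpa [editStep] using hok⟩
      cases i with
      | zero => simp [editStep, osa]
      | succ k => simp [editStep, osa]
    | 0, j + 1 => exact ⟨by simp [editStep, osa], by simpa [editStep] using hok⟩
    | i + 1, j + 1 =>
      rw [editStep]
      cases hget : memo.get? (((i : Int) + 1), ((j : Int) + 1)) with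
      | some v =>
        refine ⟨?_, hok⟩
        have := hok (i + 1) (j + 1) v (by push_cast; exact_mod_cast hget)
        simpa using this
      | none =>
        simp only []
        obtain ⟨h1v, h1m⟩ := ih i (j + 1) memo (by omega) hok
        obtain ⟨h2v, h2m⟩ := ih (i + 1) j _ (by omega) h1m
        obtain ⟨h3v, h3m⟩ := ih i j _ (by omega) h2m
        set cost : Int := if s1.getD i ' ' = s2.getD j ' ' then 0 else 1 with hcost
        by_cases hg : 1 ≤ i ∧ 1 ≤ j ∧ s1.getD i ' ' = s2.getD (j - 1) ' '
            ∧ s1.getD (i - 1) ' ' = s2.getD j ' '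
        · obtain ⟨h4v, h4m⟩ := ih (i - 1) (j - 1) _ (by omega) h3m
          rw [if_pos hg]
          have hval : min (min
              ((editStep s1 s2 i (j+1) memo).1 + 1)
              ((editStep s1 s2 (i+1) j (editStep s1 s2 i (j+1) memo).2).1 + 1))
              ((editStep s1 s2 i j (editStep s1 s2 (i+1) j (editStep s1 s2 i (j+1) memo).2).2).1 + cost)
              = min (min (osa s1 s2 i (j + 1) + 1) (osa s1 s2 (i + 1) j + 1)) (osa s1 s2 i j + cost) := by
            rw [h1v, h2v, h3v]
          constructor
          · show min _ ((editStep s1 s2 (i-1) (j-1) _).1 + 1) = osa s1 s2 (i+1) (j+1)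
            rw [hval, h4v, osa.eq_3, if_pos hg]
          · intro a b w hw
            by_cases hk : a = i + 1 ∧ b = j + 1
            · obtain ⟨ha, hb⟩ := hk
              subst ha; subst hb
              rw [PySem.Dict.get?_insert, if_pos (by push_cast; rfl)] at hw
              rw [← Option.some_inj.mp hw]
              show min _ ((editStep s1 s2 (i-1) (j-1) _).1 + 1) = osa s1 s2 (i+1) (j+1)
              rw [hval, h4v, osa.eq_3, if_pos hg]
            · rw [PySem.Dict.get?_insert, if_neg (by
                intro h
                apply hk
                have h1 : ((a : Nat) : Int) = (i : Int) + 1 := congrArg Prod.fst h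
                have h2 : ((b : Nat) : Int) = (j : Int) + 1 := congrArg Prod.snd h
                omega)] at hw
              exact h4m a b w hw
        · rw [if_neg hg]
          have hval : min (min
              ((editStep s1 s2 i (j+1) memo).1 + 1)
              ((editStep s1 s2 (i+1) j (editStep s1 s2 i (j+1) memo).2).1 + 1))
              ((editStep s1 s2 i j (editStep s1 s2 (i+1) j (editStep s1 s2 i (j+1) memo).2).2).1 + cost)
              = osa s1 s2 (i+1) (j+1) := by
            rw [h1v, h2v, h3v, osa.eq_3, if_neg hg]
          constructor
          · exact hval
          · intro a b w hw
            by_cases hk : a = i + 1 ∧ b = j + 1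
            · obtain ⟨ha, hb⟩ := hk
              subst ha; subst hb
              rw [PySem.Dict.get?_insert, if_pos (by push_cast; rfl)] at hw
              rw [← Option.some_inj.mp hw]
              exact hval
            · rw [PySem.Dict.get?_insert, if_neg (by
                intro h
                apply hk
                have h1 : ((a : Nat) : Int) = (i : Int) + 1 := congrArg Prod.fst h
                have h2 : ((b : Nat) : Int) = (j : Int) + 1 := congrArg Prod.snd h
                omega)] at hw
              exact h3m a b w hw

theorem osaMemo_eq (s1 s2 : List Char) : osaMemo s1 s2 = osa s1 s2 s1.length s2.length := by
  have h := edit_ok s1 s2 (s1.length + s2.length) s1.length s2.length PySem.Dict.empty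
    (Nat.le_refl _) (by intro a b v hv; rw [PySem.Dict.get?_empty] at hv; cases hv)
  exact h.1

-- ---- A-side: the table invariant ----

-- row r of the table right after the two init loops
def initRow (n r : Nat) : List Int := ((r : Int)) :: List.replicate n 0

-- row i while its first j+1 entries are computed
def rowP (s1 s2 : List Char) (i j : Nat) : List Int :=
  (List.range (j+1)).map (fun u => osa s1 s2 i u) ++ List.replicate (s2.length - j) 0

-- the whole table while row i is computed up to column j
def tblRow (s1 s2 : List Char) (i j r : Nat) : List Int :=
  if r < i then rowS s1 s2 r else if r = i then rowP s1 s2 i j else initRow s2.length r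

def tbl (s1 s2 : List Char) (i j : Nat) : List (List Int) :=
  (List.range (s1.length+1)).map (tblRow s1 s2 i j)

theorem set_map_range {α : Type} (N k : Nat) (f : Nat → α) (v : α) (hk : k < N) :
    ((List.range N).map f).set k v = (List.range N).map (fun r => if r = k then v else f r) := by
  apply List.ext_getElem (by simp)
  intro u h1 h2
  simp only [List.getElem_set, List.getElem_map, List.getElem_range]
  by_cases hu : u = k
  · subst hu; simp
  · rw [if_neg (fun h => hu h.symm), if_neg hu]

theorem osa_zero_left (s1 s2 : List Char) (j : Nat) : osa s1 s2 0 j = (j : Int) := by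
  cases j with
  | zero => simp [osa]
  | succ u => simp [osa]

theorem getD_append_boundary {α : Type} (A B : List α) (b d : α) :
    (A ++ b :: B).getD A.length d = b := by
  simp [List.getD_eq_getElem?_getD]

theorem set_append_boundary {α : Type} (A B : List α) (b v : α) :
    (A ++ b :: B).set A.length v = A ++ v :: B := by
  rw [List.set_append_right _ _ (Nat.le_refl _)]
  simp

theorem getD_tbl (s1 s2 : List Char) (i j r : Nat) (hr : r < s1.length + 1) :
    PySem.List.pyGetD (tbl s1 s2 i j) ((r : Nat) : Int) [] = tblRow s1 s2 i j r := by
  rw [PySem.List.pyGetD_natCast]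
  exact PySem.List.getD_map_range _ _ _ _ hr

theorem getD_rowS (s1 s2 : List Char) (r u : Nat) (hu : u < s2.length + 1) :
    PySem.List.pyGetD (rowS s1 s2 r) ((u : Nat) : Int) 0 = osa s1 s2 r u := by
  rw [PySem.List.pyGetD_natCast]
  exact PySem.List.getD_map_range _ _ _ _ hu

theorem getD_rowP (s1 s2 : List Char) (i j u : Nat) (hu : u ≤ j) :
    PySem.List.pyGetD (rowP s1 s2 i j) ((u : Nat) : Int) 0 = osa s1 s2 i u := by
  rw [PySem.List.pyGetD_natCast]
  unfold rowP
  rw [List.getD_append _ _ _ _ (by simp; omega)]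
  exact PySem.List.getD_map_range _ _ _ _ (by omega)

theorem rowP_last (s1 s2 : List Char) (i : Nat) : rowP s1 s2 i s2.length = rowS s1 s2 i := by
  unfold rowP rowS
  simp

theorem init1_fold (s1 s2 : List Char) : ∀ K, K ≤ s1.length + 1 →
    List.foldl (fun d (u : Nat) => dlInit1Step d ((u : Nat) : Int))
      ((List.range (s1.length+1)).map (fun _ => List.replicate (s2.length+1) (0 : Int)))
      (List.range K)
    = (List.range (s1.length+1)).map
        (fun r => if r < K then initRow s2.length r else List.replicate (s2.length+1) 0) := by
  intro K
  induction K with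
  | zero =>
    intro _
    simp [List.replicate_succ]
  | succ K ih =>
    intro hK
    rw [show List.range (K+1) = List.range K ++ [K] from List.range_succ,
        List.foldl_append, ih (by omega), List.foldl_cons, List.foldl_nil]
    unfold dlInit1Step
    rw [PySem.List.pyGetD_natCast, PySem.List.getD_map_range _ _ _ _ (by omega)]
    rw [if_neg (by omega)]
    have hset0 : PySem.List.pySetD (List.replicate (s2.length+1) (0 : Int)) 0 ((K : Nat) : Int)
        = initRow s2.length K := by
      rw [PySem.List.pySetD_of_nonneg _ _ (by norm_num), Int.toNat_zero, List.replicate_succ,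
          List.set_cons_zero]
      rfl
    rw [hset0, PySem.List.pySetD_natCast, set_map_range _ _ _ _ (by omega)]
    apply List.map_congr_left
    intro r hr
    by_cases h1 : r = K
    · subst h1; simp [initRow]
    · by_cases h2 : r < K <;> [rw [if_neg h1, if_pos h2, if_pos (by omega)];
        rw [if_neg h1, if_neg h2, if_neg (by omega)]]

theorem init2_fold (s1 s2 : List Char) : ∀ K, K ≤ s2.length + 1 →
    List.foldl (fun d (u : Nat) => dlInit2Step d ((u : Nat) : Int))
      ((List.range (s1.length+1)).map (fun r => initRow s2.length r))
      (List.range K)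
    = (List.range (s1.length+1)).map
        (fun r => if r = 0 then
            (List.range K).map (fun (u : Nat) => (u : Int)) ++ List.replicate (s2.length+1-K) 0
          else initRow s2.length r) := by
  intro K
  induction K with
  | zero =>
    intro _
    simp only [List.range_zero, List.foldl_nil, List.map_nil, List.nil_append, Nat.sub_zero]
    apply List.map_congr_left
    intro r hr
    by_cases h : r = 0
    · subst h; simp [initRow, List.replicate_succ]
    · rw [if_neg h]
  | succ K ih =>
    intro hK
    rw [show List.range (K+1) = List.range K ++ [K] from List.range_succ,
        List.foldl_append, ih (by omega), List.foldl_cons, List.foldl_nil]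
    unfold dlInit2Step
    rw [PySem.List.pyGetD_zero, PySem.List.getD_map_range _ _ _ _ (by omega), if_pos rfl]
    have hrow : PySem.List.pySetD
        ((List.range K).map (fun (u : Nat) => (u : Int)) ++ List.replicate (s2.length+1-K) 0)
        ((K : Nat) : Int) ((K : Nat) : Int)
        = (List.range (K+1)).map (fun (u : Nat) => (u : Int)) ++ List.replicate (s2.length+1-(K+1)) 0 := by
      rw [PySem.List.pySetD_natCast]
      rw [show List.replicate (s2.length+1-K) (0 : Int) = 0 :: List.replicate (s2.length-K) 0
          from by rw [show s2.length+1-K = (s2.length-K)+1 by omega, List.replicate_succ]]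
      rw [List.set_append_right _ _ (by simp)]
      simp only [List.length_map, List.length_range, Nat.sub_self, List.set_cons_zero]
      rw [show List.range (K+1) = List.range K ++ [K] from List.range_succ, List.map_append]
      simp only [List.map_cons, List.map_nil, List.append_assoc, List.cons_append, List.nil_append]
      rw [show s2.length+1-(K+1) = s2.length-K from by omega]
    have hset0 : ∀ (row : List Int), PySem.List.pySetD
        ((List.range (s1.length+1)).map (fun r => if r = 0 then
          (List.range K).map (fun (u : Nat) => (u : Int)) ++ List.replicate (s2.length+1-K) 0
          else initRow s2.length r)) 0 row
        = ((List.range (s1.length+1)).map (fun r => if r = 0 then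
          (List.range K).map (fun (u : Nat) => (u : Int)) ++ List.replicate (s2.length+1-K) 0
          else initRow s2.length r)).set 0 row := by
      intro row
      rw [PySem.List.pySetD_of_nonneg _ _ (by norm_num), Int.toNat_zero]
    rw [hrow, hset0, set_map_range _ _ _ _ (by omega)]
    apply List.map_congr_left
    intro r hr
    by_cases h : r = 0
    · subst h
      rw [if_pos rfl, if_pos rfl, show (List.range K ++ [K]) = List.range (K+1)
          from List.range_succ.symm]
    · rw [if_neg h, if_neg h, if_neg h]

theorem tbl_init (s1 s2 : List Char) :
    (List.range (s1.length+1)).map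
        (fun r => if r = 0 then
            (List.range (s2.length+1)).map (fun (u : Nat) => (u : Int))
              ++ List.replicate (s2.length+1-(s2.length+1)) 0
          else initRow s2.length r)
      = tbl s1 s2 0 s2.length := by
  apply List.map_congr_left
  intro r hr
  unfold tblRow
  by_cases h : r = 0
  · subst h
    rw [if_pos rfl, if_neg (by omega), if_pos rfl]
    unfold rowP
    rw [Nat.sub_self, Nat.sub_self]
    simp only [List.replicate_zero, List.append_nil]
    apply List.map_congr_left
    intro u _
    exact (osa_zero_left s1 s2 u).symm
  · rw [if_neg h, if_neg (by omega), if_neg h]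

theorem tbl_succ (s1 s2 : List Char) (i : Nat) :
    tbl s1 s2 i s2.length = tbl s1 s2 (i+1) 0 := by
  apply List.map_congr_left
  intro r hr
  unfold tblRow
  by_cases h1 : r < i
  · rw [if_pos h1, if_pos (by omega)]
  · by_cases h2 : r = i
    · subst h2
      rw [if_neg h1, if_pos rfl, if_pos (by omega)]
      exact rowP_last s1 s2 r
    · by_cases h3 : r = i + 1
      · subst h3
        rw [if_neg h1, if_neg h2, if_neg (by omega), if_pos rfl]
        unfold rowP initRow
        rw [show (0+1) = 1 from rfl, List.range_one]
        simp only [List.map_cons, List.map_nil, Nat.sub_zero]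
        rw [show osa s1 s2 (i+1) 0 = ((i : Int) + 1) from by simp [osa]]
        push_cast
        simp
      · rw [if_neg h1, if_neg h2, if_neg (by omega), if_neg h3]

theorem mainInner_step (s1 s2 : List Char) (K J : Nat) (hK : K < s1.length) (hJ : J < s2.length) :
    dlInnerStep s1 s2 (((K+1 : Nat) : Int)) (tbl s1 s2 (K+1) J) (((J+1 : Nat) : Int))
      = tbl s1 s2 (K+1) (J+1) := by
  have hi1 : ((K+1 : Nat) : Int) - 1 = ((K : Nat) : Int) := by push_cast; ring
  have hj1 : ((J+1 : Nat) : Int) - 1 = ((J : Nat) : Int) := by push_cast; ring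
  have e_im1 : PySem.List.pyGetD (tbl s1 s2 (K+1) J) (((K+1 : Nat) : Int) - 1) []
      = rowS s1 s2 K := by
    rw [hi1, getD_tbl s1 s2 _ _ _ (by omega)]
    unfold tblRow
    rw [if_pos (by omega)]
  have e_i : PySem.List.pyGetD (tbl s1 s2 (K+1) J) (((K+1 : Nat) : Int)) []
      = rowP s1 s2 (K+1) J := by
    rw [getD_tbl s1 s2 _ _ _ (by omega)]
    unfold tblRow
    rw [if_neg (by omega), if_pos rfl]
  have e_c1 : PySem.List.pyGetD s1 (((K+1 : Nat) : Int) - 1) ' ' = s1.getD K ' ' := by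
    rw [hi1, PySem.List.pyGetD_natCast]
  have e_c2 : PySem.List.pyGetD s2 (((J+1 : Nat) : Int) - 1) ' ' = s2.getD J ' ' := by
    rw [hj1, PySem.List.pyGetD_natCast]
  have e_r1 : PySem.List.pyGetD (rowS s1 s2 K) (((J+1 : Nat) : Int)) 0 = osa s1 s2 K (J+1) :=
    getD_rowS s1 s2 K (J+1) (by omega)
  have e_r2 : PySem.List.pyGetD (rowP s1 s2 (K+1) J) (((J+1 : Nat) : Int) - 1) 0
      = osa s1 s2 (K+1) J := by
    rw [hj1]
    exact getD_rowP s1 s2 (K+1) J J (Nat.le_refl _)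
  have e_r3 : PySem.List.pyGetD (rowS s1 s2 K) (((J+1 : Nat) : Int) - 1) 0 = osa s1 s2 K J := by
    rw [hj1]
    exact getD_rowS s1 s2 K J (by omega)
  set cost : Int := if s1.getD K ' ' = s2.getD J ' ' then 0 else 1 with hcost
  set dij : Int := min (min (osa s1 s2 K (J+1) + 1) (osa s1 s2 (K+1) J + 1))
      (osa s1 s2 K J + cost) with hdij
  have hrep : List.replicate (s2.length - J) (0 : Int) = 0 :: List.replicate (s2.length - J - 1) 0 := by
    conv_lhs => rw [show s2.length - J = (s2.length - J - 1) + 1 by omega]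
    rw [List.replicate_succ]
  have e_setrow : ∀ (v : Int), PySem.List.pySetD (rowP s1 s2 (K+1) J) (((J+1 : Nat) : Int)) v
      = (List.range (J+1)).map (fun u => osa s1 s2 (K+1) u)
          ++ v :: List.replicate (s2.length - J - 1) 0 := by
    intro v
    rw [PySem.List.pySetD_natCast]
    unfold rowP
    rw [hrep]
    have hb := set_append_boundary ((List.range (J+1)).map (fun u => osa s1 s2 (K+1) u))
      (List.replicate (s2.length - J - 1) 0) 0 v
    simp only [List.length_map, List.length_range] at hb
    exact hb
  have e_newrow_get : ∀ (v d : Int),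
      PySem.List.pyGetD ((List.range (J+1)).map (fun u => osa s1 s2 (K+1) u)
          ++ v :: List.replicate (s2.length - J - 1) 0) (((J+1 : Nat) : Int)) d = v := by
    intro v d
    rw [PySem.List.pyGetD_natCast]
    have hb := getD_append_boundary ((List.range (J+1)).map (fun u => osa s1 s2 (K+1) u))
      (List.replicate (s2.length - J - 1) 0) v d
    simp only [List.length_map, List.length_range] at hb
    exact hb
  have e_rowfin : ∀ (v : Int), v = osa s1 s2 (K+1) (J+1) →
      (List.range (J+1)).map (fun u => osa s1 s2 (K+1) u)
          ++ v :: List.replicate (s2.length - J - 1) 0 = rowP s1 s2 (K+1) (J+1) := by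
    intro v hv
    unfold rowP
    rw [show List.range (J+1+1) = List.range (J+1) ++ [J+1] from List.range_succ, List.map_append]
    simp only [List.map_cons, List.map_nil, List.append_assoc, List.cons_append, List.nil_append]
    rw [hv, show s2.length - (J+1) = s2.length - J - 1 from by omega]
  have e_settbl : ∀ (row : List Int), PySem.List.pySetD (tbl s1 s2 (K+1) J) (((K+1 : Nat) : Int)) row
      = (List.range (s1.length+1)).map
          (fun r => if r = K+1 then row else tblRow s1 s2 (K+1) J r) := by
    intro row
    rw [PySem.List.pySetD_natCast]
    exact set_map_range _ _ _ _ (by omega)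
  have e_tblfin : ∀ (row : List Int), row = rowP s1 s2 (K+1) (J+1) →
      (List.range (s1.length+1)).map
          (fun r => if r = K+1 then row else tblRow s1 s2 (K+1) J r)
      = tbl s1 s2 (K+1) (J+1) := by
    intro row hv
    apply List.map_congr_left
    intro r hr
    unfold tblRow
    by_cases h1 : r = K+1
    · subst h1
      rw [if_pos rfl, if_neg (by omega), if_pos rfl, hv]
    · rw [if_neg h1]
      by_cases h2 : r < K+1
      · rw [if_pos h2, if_pos h2]
      · rw [if_neg h2, if_neg h1, if_neg h2, if_neg h1]
  unfold dlInnerStep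
  simp only []
  rw [e_c1, e_c2, e_im1, e_i, e_r1, e_r2, e_r3, ← hcost, ← hdij, e_setrow, e_settbl]
  by_cases hg : 1 ≤ K ∧ 1 ≤ J ∧ s1.getD K ' ' = s2.getD (J-1) ' '
      ∧ s1.getD (K-1) ' ' = s2.getD J ' '
  · obtain ⟨hK1, hJ1, hg3, hg4⟩ := hg
    have hgport : ((K+1 : Nat) : Int) > 1 ∧ ((J+1 : Nat) : Int) > 1
        ∧ s1.getD K ' ' = PySem.List.pyGetD s2 (((J+1 : Nat) : Int) - 2) ' '
        ∧ PySem.List.pyGetD s1 (((K+1 : Nat) : Int) - 2) ' ' = s2.getD J ' ' := by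
      refine ⟨by push_cast; omega, by push_cast; omega, ?_, ?_⟩
      · rw [show ((J+1 : Nat) : Int) - 2 = ((J-1 : Nat) : Int) from by push_cast [hJ1]; ring,
            PySem.List.pyGetD_natCast]
        exact hg3
      · rw [show ((K+1 : Nat) : Int) - 2 = ((K-1 : Nat) : Int) from by push_cast [hK1]; ring,
            PySem.List.pyGetD_natCast]
        exact hg4
    rw [if_pos hgport]
    have e_g1 : PySem.List.pyGetD ((List.range (s1.length+1)).map
        (fun r => if r = K+1 then (List.range (J+1)).map (fun u => osa s1 s2 (K+1) u)
            ++ dij :: List.replicate (s2.length - J - 1) 0 else tblRow s1 s2 (K+1) J r))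
        (((K+1 : Nat) : Int)) [] = (List.range (J+1)).map (fun u => osa s1 s2 (K+1) u)
            ++ dij :: List.replicate (s2.length - J - 1) 0 := by
      rw [PySem.List.pyGetD_natCast, PySem.List.getD_map_range _ _ _ _ (by omega), if_pos rfl]
    have e_g2 : PySem.List.pyGetD ((List.range (s1.length+1)).map
        (fun r => if r = K+1 then (List.range (J+1)).map (fun u => osa s1 s2 (K+1) u)
            ++ dij :: List.replicate (s2.length - J - 1) 0 else tblRow s1 s2 (K+1) J r))
        (((K+1 : Nat) : Int) - 2) [] = rowS s1 s2 (K-1) := by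
      rw [show ((K+1 : Nat) : Int) - 2 = ((K-1 : Nat) : Int) from by push_cast [hK1]; ring,
          PySem.List.pyGetD_natCast, PySem.List.getD_map_range _ _ _ _ (by omega),
          if_neg (by omega)]
      unfold tblRow
      rw [if_pos (by omega)]
    have e_g3 : PySem.List.pyGetD (rowS s1 s2 (K-1)) (((J+1 : Nat) : Int) - 2) 0
        = osa s1 s2 (K-1) (J-1) := by
      rw [show ((J+1 : Nat) : Int) - 2 = ((J-1 : Nat) : Int) from by push_cast [hJ1]; ring]
      exact getD_rowS s1 s2 (K-1) (J-1) (by omega)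
    have e_setrow2 : ∀ (v w : Int),
        PySem.List.pySetD ((List.range (J+1)).map (fun u => osa s1 s2 (K+1) u)
            ++ w :: List.replicate (s2.length - J - 1) 0) (((J+1 : Nat) : Int)) v
        = (List.range (J+1)).map (fun u => osa s1 s2 (K+1) u)
            ++ v :: List.replicate (s2.length - J - 1) 0 := by
      intro v w
      rw [PySem.List.pySetD_natCast]
      have hb := set_append_boundary ((List.range (J+1)).map (fun u => osa s1 s2 (K+1) u))
        (List.replicate (s2.length - J - 1) 0) w v
      simp only [List.length_map, List.length_range] at hb
      exact hb
    rw [e_g1, e_newrow_get, e_g2, e_g3, e_setrow2, PySem.List.pySetD_natCast,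
        set_map_range _ _ _ _ (by omega)]
    have hval : min dij (osa s1 s2 (K-1) (J-1) + 1) = osa s1 s2 (K+1) (J+1) := by
      rw [osa.eq_3]
      rw [if_pos (show 1 ≤ K ∧ 1 ≤ J ∧ s1.getD K ' ' = s2.getD (J-1) ' '
          ∧ s1.getD (K-1) ' ' = s2.getD J ' ' from ⟨hK1, hJ1, hg3, hg4⟩)]
    apply List.map_congr_left
    intro r hr
    by_cases h1 : r = K+1
    · subst h1
      rw [if_pos rfl]
      unfold tblRow
      rw [if_neg (by omega), if_pos rfl]
      exact e_rowfin _ hval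
    · rw [if_neg h1, if_neg h1]
      unfold tblRow
      by_cases h2 : r < K+1
      · rw [if_pos h2, if_pos h2]
      · rw [if_neg h2, if_neg h1, if_neg h2, if_neg h1]
  · have hgport : ¬ (((K+1 : Nat) : Int) > 1 ∧ ((J+1 : Nat) : Int) > 1
        ∧ s1.getD K ' ' = PySem.List.pyGetD s2 (((J+1 : Nat) : Int) - 2) ' '
        ∧ PySem.List.pyGetD s1 (((K+1 : Nat) : Int) - 2) ' ' = s2.getD J ' ') := by
      rintro ⟨g1, g2, g3, g4⟩
      apply hg
      have hK1 : 1 ≤ K := by omega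
      have hJ1 : 1 ≤ J := by omega
      refine ⟨hK1, hJ1, ?_, ?_⟩
      · rw [show ((J+1 : Nat) : Int) - 2 = ((J-1 : Nat) : Int) from by push_cast [hJ1]; ring,
            PySem.List.pyGetD_natCast] at g3
        exact g3
      · rw [show ((K+1 : Nat) : Int) - 2 = ((K-1 : Nat) : Int) from by push_cast [hK1]; ring,
            PySem.List.pyGetD_natCast] at g4
        exact g4
    rw [if_neg hgport]
    apply e_tblfin
    apply e_rowfin
    rw [osa.eq_3, if_neg hg]

theorem mainInner_fold (s1 s2 : List Char) (K : Nat) (hK : K < s1.length) : ∀ J, J ≤ s2.length →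
    List.foldl (fun d (u : Nat) => dlInnerStep s1 s2 (((K+1 : Nat) : Int)) d (((u+1 : Nat) : Int)))
      (tbl s1 s2 (K+1) 0) (List.range J)
    = tbl s1 s2 (K+1) J := by
  intro J
  induction J with
  | zero => intro _; rfl
  | succ J ih =>
    intro hJ
    rw [show List.range (J+1) = List.range J ++ [J] from List.range_succ,
        List.foldl_append, ih (by omega), List.foldl_cons, List.foldl_nil]
    exact mainInner_step s1 s2 K J hK (by omega)

theorem mainOuter_step (s1 s2 : List Char) (K : Nat) (hK : K < s1.length) :
    dlOuterStep s1 s2 s2.length (tbl s1 s2 K s2.length) (((K+1 : Nat) : Int))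
      = tbl s1 s2 (K+1) s2.length := by
  unfold dlOuterStep
  rw [tbl_succ s1 s2 K]
  rw [PySem.List.pyRange_one]
  rw [show ((s2.length : Int) + 1 - 1).toNat = s2.length by omega]
  rw [List.foldl_map]
  have hfun : (fun (d : List (List Int)) (u : Nat) =>
        dlInnerStep s1 s2 (((K+1 : Nat) : Int)) d (1 + (u : Int)))
      = (fun d (u : Nat) => dlInnerStep s1 s2 (((K+1 : Nat) : Int)) d (((u+1 : Nat) : Int))) := by
    funext d u
    congr 1
    push_cast
    ring
  rw [hfun]
  exact mainInner_fold s1 s2 K hK s2.length (Nat.le_refl _)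

theorem mainOuter_fold (s1 s2 : List Char) : ∀ K, K ≤ s1.length →
    List.foldl (fun d (u : Nat) => dlOuterStep s1 s2 s2.length d (((u+1 : Nat) : Int)))
      (tbl s1 s2 0 s2.length) (List.range K)
    = tbl s1 s2 K s2.length := by
  intro K
  induction K with
  | zero => intro _; rfl
  | succ K ih =>
    intro hK
    rw [show List.range (K+1) = List.range K ++ [K] from List.range_succ,
        List.foldl_append, ih (by omega), List.foldl_cons, List.foldl_nil]
    exact mainOuter_step s1 s2 K (by omega)

theorem dl_eq (s1 s2 : String) :
    damerau_levenshtein s1 s2 = osa s1.toList s2.toList s1.toList.length s2.toList.length := by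
  unfold damerau_levenshtein
  set c1 := s1.toList with hc1
  set c2 := s2.toList with hc2
  set m := c1.length with hm
  set n := c2.length with hn
  show PySem.List.pyGetD (PySem.List.pyGetD
      (List.foldl (dlOuterStep c1 c2 n)
        (List.foldl dlInit2Step
          (List.foldl dlInit1Step
            ((PySem.List.pyRange 0 ((m : Int)+1) 1).map (fun _ => List.replicate (n+1) (0:Int)))
            (PySem.List.pyRange 0 ((m : Int)+1) 1))
          (PySem.List.pyRange 0 ((n : Int)+1) 1))
        (PySem.List.pyRange 1 ((m : Int)+1) 1)) (-1) []) (-1) 0 = osa c1 c2 m n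
  rw [PySem.List.pyRange_one 0 ((m : Int) + 1), PySem.List.pyRange_one 0 ((n : Int) + 1),
      PySem.List.pyRange_one 1 ((m : Int) + 1)]
  rw [show ((m : Int) + 1 - 0).toNat = m + 1 by omega,
      show ((n : Int) + 1 - 0).toNat = n + 1 by omega,
      show ((m : Int) + 1 - 1).toNat = m by omega]
  rw [List.map_map, List.foldl_map, List.foldl_map, List.foldl_map]
  have h1 : (fun (d : List (List Int)) (u : Nat) => dlInit1Step d (0 + (u : Int)))
      = (fun d (u : Nat) => dlInit1Step d ((u : Nat) : Int)) := by
    funext d u; congr 1; ring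
  have h2 : (fun (d : List (List Int)) (u : Nat) => dlInit2Step d (0 + (u : Int)))
      = (fun d (u : Nat) => dlInit2Step d ((u : Nat) : Int)) := by
    funext d u; congr 1; ring
  have h3 : (fun (d : List (List Int)) (u : Nat) => dlOuterStep c1 c2 n d (1 + (u : Int)))
      = (fun d (u : Nat) => dlOuterStep c1 c2 n d (((u+1 : Nat) : Int))) := by
    funext d u; congr 1; push_cast; ring
  rw [h1, h2, h3]
  rw [show ((fun _ => List.replicate (n+1) (0:Int)) ∘ (fun (k : Nat) => (0 : Int) + ↑k))
      = (fun (_ : Nat) => List.replicate (n+1) (0:Int)) from rfl]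
  rw [init1_fold c1 c2 (m+1) (Nat.le_refl _)]
  have hrw : (List.range (m+1)).map
      (fun r => if r < m + 1 then initRow n r else List.replicate (n+1) 0)
      = (List.range (m+1)).map (fun r => initRow n r) := by
    apply List.map_congr_left
    intro r hr
    rw [if_pos (by simp at hr; omega)]
  rw [hrw, init2_fold c1 c2 (n+1) (Nat.le_refl _), tbl_init c1 c2,
      mainOuter_fold c1 c2 m (Nat.le_refl _)]
  unfold tbl
  rw [lastEntry m _ []]
  unfold tblRow
  rw [if_neg (by omega), if_pos rfl, rowP_last]
  exact lastEntry n _ 0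

-- A's accumulator loop produces exactly B's filter-map-filter pipeline
theorem suggestions_eq (word : String) (max_distance : Int) (dist : String → Int) :
    ∀ (l : List String) (acc : List (String × Int)),
    List.foldl (fun suggestions correct_word =>
      if |PySem.Str.len correct_word - PySem.Str.len word| > max_distance then suggestions
      else if dist correct_word ≤ max_distance then
        suggestions ++ [(correct_word, dist correct_word)] else suggestions) acc l
    = acc ++ (((l.filter (fun cw => |PySem.Str.len cw - PySem.Str.len word| ≤ max_distance)).map
        (fun cw => (cw, dist cw))).filter (fun p => p.2 ≤ max_distance)) := by
  intro l
  induction l with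
  | nil => intro acc; simp
  | cons cw l ih =>
    intro acc
    rw [List.foldl_cons]
    by_cases h1 : |PySem.Str.len cw - PySem.Str.len word| > max_distance
    · rw [if_pos h1, ih acc, List.filter_cons, if_neg (by simpa using not_le.mpr h1)]
    · have h1' : decide (|PySem.Str.len cw - PySem.Str.len word| ≤ max_distance) = true := by
        simpa using not_lt.mp h1
      rw [if_neg h1, List.filter_cons, if_pos h1', List.map_cons, List.filter_cons]
      by_cases h2 : dist cw ≤ max_distance
      · have h2' : decide (((cw, dist cw) : String × Int).2 ≤ max_distance) = true := by
          simpa using h2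
        rw [if_pos h2, if_pos h2', ih (acc ++ [(cw, dist cw)]), List.append_assoc]
        rfl
      · have h2' : ¬ (decide (((cw, dist cw) : String × Int).2 ≤ max_distance) = true) := by
          simpa using h2
        rw [if_neg h2, if_neg h2', ih acc]

-- ===== VERDICT (by name: the statement is the Claim_ definition above) =====
theorem spell_check_spec : Claim_equal_spell_check := by
  intro word dictionary max_distance _
  unfold Spec_spell_check spell_check spell_check_alt
  have hdist : ∀ cw : String,
      damerau_levenshtein (PySem.Str.lower word) (PySem.Str.lower cw)
        = osaMemo (PySem.Str.lower word).toList (PySem.Str.lower cw).toList := by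
    intro cw
    rw [dl_eq, osaMemo_eq]
  simp only [hdist]
  rw [suggestions_eq word max_distance
      (fun cw => osaMemo (PySem.Str.lower word).toList (PySem.Str.lower cw).toList) dictionary []]
  rfl
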